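-- pv_equiv track=rewrite | github.com/apache/flink | tools/travis/mvn_diff_test.py | get_changed_parents
-- ===== SOURCE A (Python) =====
-- def get_changed_parents(modules, diff_list):
--     changed = []
--     for filepath in diff_list:
--         if filepath.endswith("/pom.xml") or filepath == "pom.xml":
--             parent_module = filepath[:-len("pom.xml")].rstrip('/')
--             if any(module.startswith(parent_module) for module in modules):
--                 changed.append(filepath)
--     return changed
-- ===== SOURCE B (Python) =====
-- def get_changed_parents(modules, diff_list):
--     # Build the set of every prefix of every module once; each diff is then
--     # answered by a single set-membership test instead of a startswith scan
--     # over all modules.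
--     prefixes = set()
--     for m in modules:
--         for k in range(len(m) + 1):
--             prefixes.add(m[:k])
--     return [fp for fp in diff_list
--             if (fp.endswith("/pom.xml") or fp == "pom.xml")
--             and fp[:-len("pom.xml")].rstrip('/') in prefixes]
-- ===== Notes on version B (the rewrite author's own statement) =====
-- stated objective: alternative
-- what changed: Instead of scanning all modules with startswith for every pom.xml diff, B precomputes the set of all prefixes of all modules once and answers each diff with a set-membership test.
import Mathlib
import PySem

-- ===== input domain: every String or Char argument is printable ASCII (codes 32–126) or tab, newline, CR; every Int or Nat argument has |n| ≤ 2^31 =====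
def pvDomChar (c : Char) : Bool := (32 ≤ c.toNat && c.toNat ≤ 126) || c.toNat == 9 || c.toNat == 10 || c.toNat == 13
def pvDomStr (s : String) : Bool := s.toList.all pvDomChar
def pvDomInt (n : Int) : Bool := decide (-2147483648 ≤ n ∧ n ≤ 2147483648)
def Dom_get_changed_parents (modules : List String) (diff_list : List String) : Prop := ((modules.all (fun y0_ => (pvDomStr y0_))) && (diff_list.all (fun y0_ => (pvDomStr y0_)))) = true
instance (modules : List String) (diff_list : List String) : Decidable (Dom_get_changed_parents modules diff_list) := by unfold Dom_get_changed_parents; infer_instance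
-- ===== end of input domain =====

-- B builds the set of all prefixes of all modules once and answers each diff with one set-membership test (a different algorithm, similar cost).
-- Equivalence is about return values; neither program mutates its arguments.

-- ===== PORT A =====
-- hand port of s.rstrip('/'): drop '/' code points from the right; exact for this single-char case
def rstripSlash (cs : List Char) : List Char :=
  (cs.reverse.dropWhile (fun c => c = '/')).reverse

-- filepath[:-len("pom.xml")].rstrip('/')  (both Pythons contain this exact expression)
def parentOf (fp : String) : List Char :=
  rstripSlash (PySem.List.slice fp.toList none (some (-7)))

def get_changed_parents (modules : List String) (diff_list : List String) : List String :=
  diff_list.foldl (fun changed filepath =>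
    if PySem.Str.endswith filepath "/pom.xml" || filepath == "pom.xml" then
      if modules.any (fun m => PySem.Chars.startswith m.toList (parentOf filepath)) then
        changed ++ [filepath]
      else changed
    else changed) []

-- ===== PORT B =====
-- prefixes = set(); for m in modules: for k in range(len(m)+1): prefixes.add(m[:k])
def prefixSet (modules : List String) : PySem.Set (List Char) :=
  modules.foldl (fun s m =>
    (PySem.List.pyRange 0 ((m.toList.length : Int) + 1) 1).foldl
      (fun s k => PySem.Set.add s (PySem.List.slice m.toList none (some k))) s)
    PySem.Set.empty

def get_changed_parents_alt (modules : List String) (diff_list : List String) : List String :=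
  let prefixes := prefixSet modules
  diff_list.filter (fun fp =>
    (PySem.Str.endswith fp "/pom.xml" || fp == "pom.xml")
      && PySem.Set.contains prefixes (parentOf fp))

-- ===== PRECONDITION & SPEC =====
def Spec_get_changed_parents (modules : List String) (diff_list : List String) (out : List String) : Prop := out = get_changed_parents_alt modules diff_list
instance (modules : List String) (diff_list : List String) (out : List String) : Decidable (Spec_get_changed_parents modules diff_list out) := by unfold Spec_get_changed_parents; infer_instance

-- ===== CLAIM (what is proved, stated in full; the proofs are below) =====
def Claim_equal_get_changed_parents : Prop := ∀ (modules : List String) (diff_list : List String), Dom_get_changed_parents modules diff_list → Spec_get_changed_parents modules diff_list (get_changed_parents modules diff_list)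

-- ===== LEMMAS AND PROOFS =====

lemma exists_slice_iff_prefix (xs : List Char) (p : List Char) :
    (∃ k ∈ PySem.List.pyRange 0 ((xs.length : Int) + 1) 1,
      p = PySem.List.slice xs none (some k)) ↔ p <+: xs := by
  constructor
  · rintro ⟨k, hk, rfl⟩
    rw [PySem.List.mem_pyRange_one] at hk
    rw [PySem.List.slice_to _ hk.1]
    exact List.take_prefix _ _
  · intro h
    refine ⟨(p.length : Int), ?_, ?_⟩
    · rw [PySem.List.mem_pyRange_one]
      have := h.length_le
      omega
    · rw [PySem.List.slice_to _ (by positivity)]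
      simpa using (List.prefix_iff_eq_take.mp h)

lemma mem_prefix_fold (ms : List String) (s : PySem.Set (List Char)) (p : List Char) :
    p ∈ ms.foldl (fun s m =>
      (PySem.List.pyRange 0 ((m.toList.length : Int) + 1) 1).foldl
        (fun s k => PySem.Set.add s (PySem.List.slice m.toList none (some k))) s) s
    ↔ p ∈ s ∨ ∃ m ∈ ms, p <+: m.toList := by
  induction ms generalizing s with
  | nil => simp
  | cons m ms ih =>
    simp only [List.foldl_cons, ih, PySem.Set.mem_foldl_add, exists_slice_iff_prefix,
      List.mem_cons]
    constructor
    · rintro (⟨h | h⟩ | h)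
      · exact Or.inl h
      · exact Or.inr ⟨m, Or.inl rfl, h⟩
      · obtain ⟨m', hm', hp⟩ := h
        exact Or.inr ⟨m', Or.inr hm', hp⟩
    · rintro (h | ⟨m', (rfl | hm'), hp⟩)
      · exact Or.inl (Or.inl h)
      · exact Or.inl (Or.inr hp)
      · exact Or.inr ⟨m', hm', hp⟩

lemma contains_prefixSet (ms : List String) (p : List Char) :
    PySem.Set.contains (prefixSet ms) p
      = ms.any (fun m => PySem.Chars.startswith m.toList p) := by
  rw [Bool.eq_iff_iff, PySem.Set.contains_iff, List.any_eq_true]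
  unfold prefixSet
  rw [mem_prefix_fold]
  simp [PySem.Chars.startswith_iff, PySem.Set.empty]

lemma foldA_eq_filter (ms : List String) (dl : List String) (acc : List String) :
    dl.foldl (fun changed filepath =>
      if PySem.Str.endswith filepath "/pom.xml" || filepath == "pom.xml" then
        if ms.any (fun m => PySem.Chars.startswith m.toList (parentOf filepath)) then
          changed ++ [filepath]
        else changed
      else changed) acc
    = acc ++ dl.filter (fun fp =>
        (PySem.Str.endswith fp "/pom.xml" || fp == "pom.xml")
          && ms.any (fun m => PySem.Chars.startswith m.toList (parentOf fp))) := by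
  induction dl generalizing acc with
  | nil => simp
  | cons fp dl ih =>
    simp only [List.foldl_cons, List.filter_cons]
    cases h1 : (PySem.Str.endswith fp "/pom.xml" || fp == "pom.xml") <;>
      cases h2 : (ms.any fun m => PySem.Chars.startswith m.toList (parentOf fp))
    · simp only [h1, Bool.false_eq_true, if_false, Bool.false_and, ih]
    · simp only [h1, Bool.false_eq_true, if_false, Bool.false_and, ih]
    · simp only [h1, h2, Bool.false_eq_true, if_true, if_false, Bool.true_and, ih]
    · simp only [h1, h2, if_true, Bool.true_and, ih, List.append_assoc,
        List.singleton_append]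

-- ===== VERDICT (by name: the statement is the Claim_ definition above) =====
theorem get_changed_parents_spec : Claim_equal_get_changed_parents := by
  intro modules diff_list _
  unfold Spec_get_changed_parents
  simp only [get_changed_parents, get_changed_parents_alt]
  rw [foldA_eq_filter, List.nil_append]
  apply List.filter_congr
  intro fp _
  rw [contains_prefixSet]
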